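-- pv_equiv track=rewrite | github.com/MrBrantCode/unitest_baseline | mut_generate/mist_train_taco/taco_7562/solution.py | can_reach_goal
-- ===== SOURCE A (Python) =====
-- def can_reach_goal(max_roulette, n, instructions):
--     # Add dummy instructions for "Furidashi" and "Agari"
--     ds = [0] + instructions + [0]
--
--     # Initialize graph and reverse graph
--     g = [[] for _ in range(n + 2)]
--     rg = [[] for _ in range(n + 2)]
--
--     # Build the graph and reverse graph
--     for i in range(n + 2):
--         for j in range(min(n + 1, i + 1), min(n + 1, i + max_roulette) + 1):
--             j = max(0, min(n + 1, j + ds[j]))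
--             g[i].append(j)
--             rg[j].append(i)
--
--     # Depth-first search function
--     def dfs(graph, visited, i):
--         visited[i] = True
--         for j in graph[i]:
--             if not visited[j]:
--                 dfs(graph, visited, j)
--
--     # Initialize visited arrays for both graphs
--     visited_g = [False] * (n + 2)
--     visited_rg = [False] * (n + 2)
--
--     # Perform DFS on both graphs
--     dfs(g, visited_g, 0)
--     dfs(rg, visited_rg, n + 1)
--
--     # Check if there's any node reachable from "Furidashi" but not from "Agari"
--     if any((b and not rb) for b, rb in zip(visited_g, visited_rg)):
--         return 'NG'
--     else:
--         return 'OK'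
-- ===== SOURCE B (Python) =====
-- def can_reach_goal(max_roulette, n, instructions):
--     # Iterative FIFO search (explicit worklist) instead of recursive DFS; the jump
--     # destinations are precomputed once into `final`, and the predecessor lists are
--     # built by one grouping pass over the successor lists.
--     ds = [0] + instructions + [0]
--     size = n + 2
--     final = [max(0, min(n + 1, j + d)) for j, d in enumerate(ds)]
--     succ = [[final[j]
--              for j in range(min(n + 1, i + 1), min(n + 1, i + max_roulette) + 1)]
--             for i in range(size)]
--     pred = [[] for _ in range(size)]
--     for u in range(size):
--         for v in succ[u]:
--             pred[v].append(u)
--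
--     def _reach(adj, start):
--         seen = [False] * size
--         seen[start] = True
--         queue = [start]
--         while queue:
--             u = queue.pop(0)
--             for v in adj[u]:
--                 if not seen[v]:
--                     seen[v] = True
--                     queue.append(v)
--         return seen
--
--     forward = _reach(succ, 0)
--     backward = _reach(pred, n + 1)
--     if all(b or not f for f, b in zip(forward, backward)):
--         return 'OK'
--     else:
--         return 'NG'
-- ===== Notes on version B (the rewrite author's own statement) =====
-- stated objective: alternative
-- what changed: B replaces A's recursive double DFS with an iterative FIFO worklist search, precomputes each square's jump destination once into a `final` array instead of re-clamping inside the nested edge loop, and builds the reverse adjacency by a separate grouping pass over the successor lists instead of alongside the forward graph.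
import Mathlib
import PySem

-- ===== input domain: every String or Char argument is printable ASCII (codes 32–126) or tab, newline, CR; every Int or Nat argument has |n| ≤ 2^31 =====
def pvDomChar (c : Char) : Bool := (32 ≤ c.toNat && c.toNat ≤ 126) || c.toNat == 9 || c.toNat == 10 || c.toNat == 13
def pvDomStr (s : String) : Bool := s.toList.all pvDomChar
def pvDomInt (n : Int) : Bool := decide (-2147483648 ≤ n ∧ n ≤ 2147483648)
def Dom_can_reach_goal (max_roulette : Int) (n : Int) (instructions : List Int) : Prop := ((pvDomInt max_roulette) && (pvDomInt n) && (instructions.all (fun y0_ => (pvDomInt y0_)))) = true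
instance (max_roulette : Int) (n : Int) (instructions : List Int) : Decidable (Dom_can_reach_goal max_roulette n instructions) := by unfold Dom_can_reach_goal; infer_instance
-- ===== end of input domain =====

-- B replaces A's recursive double DFS by an iterative FIFO worklist search over
-- precomputed jump destinations (same asymptotic cost, different traversal).

-- ===== PORT A =====
-- A's recursive `dfs`, made total with a fuel counter.  The caller passes
-- (number of nodes)+1, which is never exhausted: every nested call marks a
-- previously unvisited node first, so the recursion depth is at most #nodes+1.
def pvDfs (fuel : Nat) (graph : List (List Int)) (visited : List Bool) (i : Int) : List Bool :=
  match fuel with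
  | 0 => visited
  | f+1 =>
    (PySem.List.pyGetD graph i []).foldl
      (fun v j => if PySem.List.pyGetD v j false then v else pvDfs f graph v j)
      (visited.set i.toNat true)  -- i ≥ 0 on every call A makes, so `.set i.toNat` is exact

def can_reach_goal (max_roulette : Int) (n : Int) (instructions : List Int) : String :=
  let ds : List Int := [0] ++ instructions ++ [0]
  let init : List (List Int) := List.replicate (n+2).toNat []
  let gr :=
    (PySem.List.pyRange 0 (n+2)).foldl
      (fun (s : List (List Int) × List (List Int)) i =>
        (PySem.List.pyRange (min (n+1) (i+1)) (min (n+1) (i+max_roulette) + 1)).foldl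
          (fun s j =>
            let t := max 0 (min (n+1) (j + PySem.List.pyGetD ds j 0))
            -- g[i].append(t); rg[t].append(i) — i and t are in range here, so .toNat is exact
            (s.1.modify i.toNat (· ++ [t]), s.2.modify t.toNat (· ++ [i])))
          s)
      (init, init)
  let visited_g := pvDfs ((n+2).toNat + 1) gr.1 (List.replicate (n+2).toNat false) 0
  let visited_rg := pvDfs ((n+2).toNat + 1) gr.2 (List.replicate (n+2).toNat false) (n+1)
  if (visited_g.zip visited_rg).any (fun p => p.1 && !p.2) then "NG" else "OK"

-- ===== PORT B =====
-- B's iterative worklist loop (`while queue: u = queue.pop(0) …`), made total with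
-- a fuel counter.  The caller passes 2*size+2: each iteration pops one element and
-- every push marks a previously unseen node, so 2*(#unseen)+len(queue) strictly
-- decreases and the loop runs at most 2*size+1 times.
def pvBfs (fuel : Nat) (adj : List (List Int)) (seen : List Bool) (queue : List Int) : List Bool :=
  match fuel, queue with
  | 0, _ => seen
  | _+1, [] => seen
  | f+1, u :: q =>
    let s := (PySem.List.pyGetD adj u []).foldl
      (fun (sq : List Bool × List Int) v =>
        if PySem.List.pyGetD sq.1 v false then sq else (sq.1.set v.toNat true, sq.2 ++ [v]))
      (seen, q)
    pvBfs f adj s.1 s.2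

-- B's helper `_reach(adj, start)` (size and the fuel bound it determines are explicit)
def pvReachList (size : Int) (adj : List (List Int)) (start : Int) : List Bool :=
  pvBfs (2*size.toNat + 2) adj ((List.replicate size.toNat false).set start.toNat true) [start]

def can_reach_goal_alt (max_roulette : Int) (n : Int) (instructions : List Int) : String :=
  let ds : List Int := [0] ++ instructions ++ [0]
  let size := n + 2
  let final := (PySem.List.enumerate ds 0).map (fun p => max 0 (min (n+1) (p.1 + p.2)))
  let succ := (PySem.List.pyRange 0 size).map (fun i =>
      (PySem.List.pyRange (min (n+1) (i+1)) (min (n+1) (i+max_roulette) + 1)).map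
        (fun j => PySem.List.pyGetD final j 0))
  let pred := (PySem.List.pyRange 0 size).foldl
      (fun p u => (PySem.List.pyGetD succ u []).foldl (fun p v => p.modify v.toNat (· ++ [u])) p)
      (List.replicate size.toNat ([] : List Int))
  let forward := pvReachList size succ 0
  let backward := pvReachList size pred (n+1)
  if (forward.zip backward).all (fun p => p.2 || !p.1) then "OK" else "NG"

-- ===== PRECONDITION & SPEC =====
-- Pre_ excludes exactly the inputs where A raises: n ≤ -2 (the visited array is
-- empty, `visited[0]` raises IndexError), and instruction lists shorter than n
-- with max_roulette ≥ 0 (then square n+1 is landed on and `ds[n+1]` raises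
-- IndexError).  With max_roulette ≤ -1 no square is ever landed on, so short
-- lists are harmless and stay inside Pre_.
def Pre_can_reach_goal (max_roulette : Int) (n : Int) (instructions : List Int) : Prop :=
  -1 ≤ n ∧ (n ≤ (instructions.length : Int) ∨ max_roulette ≤ -1)
instance (max_roulette : Int) (n : Int) (instructions : List Int) : Decidable (Pre_can_reach_goal max_roulette n instructions) := by unfold Pre_can_reach_goal; infer_instance

def pvWitness_can_reach_goal : Int × Int × List Int := (3, 2, [0, 0])

def Spec_can_reach_goal (max_roulette : Int) (n : Int) (instructions : List Int) (out : String) : Prop := out = can_reach_goal_alt max_roulette n instructions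
instance (max_roulette : Int) (n : Int) (instructions : List Int) (out : String) : Decidable (Spec_can_reach_goal max_roulette n instructions out) := by unfold Spec_can_reach_goal; infer_instance

-- ===== CLAIM (what is proved, stated in full; the proofs are below) =====
def Claim_equal_can_reach_goal : Prop := ∀ (max_roulette : Int) (n : Int) (instructions : List Int), Dom_can_reach_goal max_roulette n instructions → Pre_can_reach_goal max_roulette n instructions → Spec_can_reach_goal max_roulette n instructions (can_reach_goal max_roulette n instructions)

-- ===== LEMMAS AND PROOFS =====

-- Proof-side vocabulary: the jump target, one adjacency row, the edge relation of
-- an adjacency structure, reachability, in-bounds nodes, the visited-slot reader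
-- and the count of unvisited slots.
def pvTgt (n : Int) (ds : List Int) (j : Int) : Int := max 0 (min (n+1) (j + PySem.List.pyGetD ds j 0))
def pvRow (mr n : Int) (ds : List Int) (i : Int) : List Int :=
  (PySem.List.pyRange (min (n+1) (i+1)) (min (n+1) (i+mr) + 1)).map (pvTgt n ds)
def pvE (adj : List (List Int)) (u v : Int) : Prop := v ∈ PySem.List.pyGetD adj u []
def pvReachRel (adj : List (List Int)) (s v : Int) : Prop := Relation.ReflTransGen (pvE adj) s v
def pvInB (sz : Nat) (x : Int) : Prop := 0 ≤ x ∧ x < (sz : Int)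
def pvGood (adj : List (List Int)) (sz : Nat) : Prop := ∀ u v, pvE adj u v → pvInB sz v
def pvVal (v : List Bool) (k : Nat) : Bool := v.getD k false
def pvCF (v : List Bool) : Nat := v.countP (fun b => !b)

-- generic small facts
lemma pvGetD_cases {α : Type} (xs : List α) (i : Int) (d : α) :
    PySem.List.pyGetD xs i d = d ∨ PySem.List.pyGetD xs i d ∈ xs := by
  rcases h : PySem.List.pyGet? xs i with _ | v
  · left; simp [PySem.List.pyGetD, h]
  · right
    have : PySem.List.pyGetD xs i d = v := by simp [PySem.List.pyGetD, h]
    rw [this]; exact PySem.List.mem_of_pyGet?_eq_some xs h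

lemma pvVal_set_self (v : List Bool) (k : Nat) (h : k < v.length) : pvVal (v.set k true) k = true := by
  simp [pvVal, List.getD_eq_getElem?_getD, h]

lemma pvVal_set_other (v : List Bool) (k m : Nat) (h : m ≠ k) : pvVal (v.set k true) m = pvVal v m := by
  simp [pvVal, List.getD_eq_getElem?_getD, List.getElem?_set_ne (Ne.symm h)]

lemma pvVal_set_mono (v : List Bool) (k m : Nat) (h : pvVal v m = true) : pvVal (v.set k true) m = true := by
  by_cases hm : m = k
  · subst hm
    by_cases hl : m < v.length
    · exact pvVal_set_self v m hl
    · have : v.set m true = v := List.set_eq_of_length_le (by omega)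
      rw [this]; exact h
  · rw [pvVal_set_other v k m hm]; exact h

lemma pvVal_int (s : List Bool) (sz : Nat) (a : Int) (hlen : s.length = sz) (ha : pvInB sz a) :
    PySem.List.pyGetD s a false = pvVal s a.toNat := by
  obtain ⟨h0, h1⟩ := ha
  rw [PySem.List.pyGetD_eq_getElem s false h0 (by omega)]
  rw [pvVal, List.getD_eq_getElem?_getD, List.getElem?_eq_getElem (by omega)]
  rfl

lemma pvCF_set : ∀ (v : List Bool) (k : Nat), k < v.length → pvVal v k = false →
    pvCF (v.set k true) + 1 = pvCF v := by
  intro v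
  induction v with
  | nil => intro k h; simp at h
  | cons x v ih =>
    intro k hk hf
    cases k with
    | zero =>
      have hx : x = false := hf
      subst hx
      simp [pvCF]
    | succ k =>
      have hf' : pvVal v k = false := hf
      have := ih k (by simpa using hk) hf'
      simp only [List.set_cons_succ, pvCF, List.countP_cons] at *
      omega

lemma pvCF_mono (a : List Bool) : ∀ (b : List Bool), a.length = b.length →
    (∀ k, pvVal a k = true → pvVal b k = true) → pvCF b ≤ pvCF a := by
  induction a with
  | nil => intro b hl _; cases b <;> simp_all [pvCF]
  | cons x a ih =>
    intro b hl h
    cases b with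
    | nil => simp at hl
    | cons y b =>
      have hx : x = true → y = true := h 0
      have ht : pvCF b ≤ pvCF a := ih b (by simpa using hl) (fun k => h (k+1))
      simp only [pvCF, List.countP_cons] at *
      cases x <;> cases y
      all_goals simp_all
      all_goals omega

lemma pvCF_replicate (sz : Nat) : pvCF (List.replicate sz false) = sz := by
  simp [pvCF, List.countP_replicate]

lemma pvVal_replicate (sz k : Nat) : pvVal (List.replicate sz false) k = false := by
  simp [pvVal, List.getD_eq_getElem?_getD, List.getElem?_replicate]
  split <;> rfl

-- ===== DFS (port A's traversal) =====

lemma pvDfs_length (f : Nat) (adj : List (List Int)) : ∀ (v : List Bool) (i : Int),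
    (pvDfs f adj v i).length = v.length := by
  induction f with
  | zero => intro v i; rfl
  | succ f ih =>
    intro v i
    have aux : ∀ (l : List Int) (s : List Bool),
        (l.foldl (fun v j => if PySem.List.pyGetD v j false then v else pvDfs f adj v j) s).length
          = s.length := by
      intro l
      induction l with
      | nil => intro s; rfl
      | cons a l ihl =>
        intro s
        simp only [List.foldl_cons]
        rw [ihl]
        split
        · rfl
        · exact ih s a
    simp only [pvDfs]
    rw [aux]
    simp

lemma pvDfs_mono (f : Nat) (adj : List (List Int)) : ∀ (v : List Bool) (i : Int) (k : Nat),
    pvVal v k = true → pvVal (pvDfs f adj v i) k = true := by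
  induction f with
  | zero => intro v i k h; exact h
  | succ f ih =>
    intro v i k h
    have aux : ∀ (l : List Int) (s : List Bool), pvVal s k = true →
        pvVal (l.foldl (fun v j => if PySem.List.pyGetD v j false then v else pvDfs f adj v j) s) k
          = true := by
      intro l
      induction l with
      | nil => intro s hs; exact hs
      | cons a l ihl =>
        intro s hs
        simp only [List.foldl_cons]
        split
        · exact ihl s hs
        · exact ihl _ (ih s a k hs)
    simp only [pvDfs]
    exact aux _ _ (pvVal_set_mono v i.toNat k h)

lemma pvDfs_sound (adj : List (List Int)) (hpos : ∀ u w, pvE adj u w → 0 ≤ w) :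
    ∀ (f : Nat) (v : List Bool) (i : Int), 0 ≤ i →
    ∀ k, pvVal (pvDfs f adj v i) k = true → pvVal v k = true ∨ pvReachRel adj i ↑k := by
  intro f
  induction f with
  | zero => intro v i _ k hk; left; exact hk
  | succ f ih =>
    intro v i h0 k hk
    have aux : ∀ (l : List Int) (s : List Bool), (∀ j ∈ l, pvE adj i j) →
        (∀ m, pvVal s m = true → pvVal v m = true ∨ pvReachRel adj i ↑m) →
        ∀ m, pvVal (l.foldl (fun v j => if PySem.List.pyGetD v j false then v
            else pvDfs f adj v j) s) m = true →
          pvVal v m = true ∨ pvReachRel adj i ↑m := by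
      intro l
      induction l with
      | nil => intro s _ hs m hm; exact hs m hm
      | cons a l ihl =>
        intro s hmem hs m hm
        simp only [List.foldl_cons] at hm
        by_cases hguard : PySem.List.pyGetD s a false = true
        · rw [if_pos hguard] at hm
          exact ihl s (fun j hj => hmem j (List.mem_cons_of_mem a hj)) hs m hm
        · rw [if_neg hguard] at hm
          have hEa : pvE adj i a := hmem a List.mem_cons_self
          have ha0 : 0 ≤ a := hpos i a hEa
          refine ihl _ (fun j hj => hmem j (List.mem_cons_of_mem a hj)) ?_ m hm
          intro m' hm'
          rcases ih s a ha0 m' hm' with h | h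
          · exact hs m' h
          · exact Or.inr (Relation.ReflTransGen.head hEa h)
      
    simp only [pvDfs] at hk
    refine aux _ _ (fun j hj => hj) ?_ k hk
    intro m hm
    by_cases hmi : m = i.toNat
    · subst hmi
      right
      rw [Int.toNat_of_nonneg h0]
      exact Relation.ReflTransGen.refl
    · left
      rw [pvVal_set_other v i.toNat m hmi] at hm
      exact hm

lemma pvDfs_complete (adj : List (List Int)) (sz : Nat) (hg : pvGood adj sz) :
    ∀ (f : Nat) (v : List Bool) (i : Int), v.length = sz → pvInB sz i →
    pvVal v i.toNat = false → pvCF v < f →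
    pvVal (pvDfs f adj v i) i.toNat = true ∧
    (∀ a : Nat, a < sz → pvVal (pvDfs f adj v i) a = true →
      pvVal v a = true ∨ (∀ b, pvE adj ↑a b → pvVal (pvDfs f adj v i) b.toNat = true)) := by
  intro f
  induction f with
  | zero => intro v i _ _ _ h; omega
  | succ f ih =>
    intro v i hlen hIn hfalse hfuel
    have hiNat : i.toNat < sz := by rcases hIn with ⟨h0, h1⟩; omega
    have hlen1 : (v.set i.toNat true).length = sz := by simp [hlen]
    have hv1i : pvVal (v.set i.toNat true) i.toNat = true :=
      pvVal_set_self v i.toNat (by omega)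
    have hcf1 : pvCF (v.set i.toNat true) < pvCF v := by
      have := pvCF_set v i.toNat (by omega) hfalse; omega
    have aux : ∀ (l : List Int), (∀ j ∈ l, pvInB sz j) → ∀ (s : List Bool), s.length = sz →
        pvCF s < f →
        (l.foldl (fun v j => if PySem.List.pyGetD v j false then v
            else pvDfs f adj v j) s).length = sz ∧
        (∀ k, pvVal s k = true →
          pvVal (l.foldl (fun v j => if PySem.List.pyGetD v j false then v
            else pvDfs f adj v j) s) k = true) ∧
        (∀ j ∈ l, pvVal (l.foldl (fun v j => if PySem.List.pyGetD v j false then v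
            else pvDfs f adj v j) s) j.toNat = true) ∧
        (∀ a : Nat, a < sz →
          pvVal (l.foldl (fun v j => if PySem.List.pyGetD v j false then v
            else pvDfs f adj v j) s) a = true →
          pvVal s a = true ∨ (∀ b, pvE adj ↑a b →
            pvVal (l.foldl (fun v j => if PySem.List.pyGetD v j false then v
              else pvDfs f adj v j) s) b.toNat = true)) := by
      intro l
      induction l with
      | nil =>
        intro _ s hslen hscf
        exact ⟨hslen, fun k hk => hk, by simp, fun a _ ha => Or.inl ha⟩
      | cons a l ihl =>
        intro hmem s hslen hscf
        have hIa : pvInB sz a := hmem a List.mem_cons_self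
        have hmem' : ∀ j ∈ l, pvInB sz j := fun j hj => hmem j (List.mem_cons_of_mem a hj)
        simp only [List.foldl_cons]
        by_cases hguard : PySem.List.pyGetD s a false = true
        · rw [if_pos hguard]
          obtain ⟨c1, c2, c3, c4⟩ := ihl hmem' s hslen hscf
          refine ⟨c1, c2, ?_, c4⟩
          intro j hj
          rcases List.mem_cons.mp hj with rfl | hj'
          · refine c2 j.toNat ?_
            rw [← pvVal_int s sz j hslen hIa]
            exact hguard
          · exact c3 j hj'
        · rw [if_neg hguard]
          have hsa : pvVal s a.toNat = false := by
            rw [← pvVal_int s sz a hslen hIa]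
            exact Bool.not_eq_true _ ▸ (Bool.eq_false_iff.mpr hguard)
          obtain ⟨d1, d4⟩ := ih s a hslen hIa hsa hscf
          have dmono := pvDfs_mono f adj s a
          have dlen : (pvDfs f adj s a).length = sz := by rw [pvDfs_length]; exact hslen
          have dcf : pvCF (pvDfs f adj s a) < f :=
            lt_of_le_of_lt (pvCF_mono s (pvDfs f adj s a) (by omega) (fun k => dmono k)) hscf
          obtain ⟨c1, c2, c3, c4⟩ := ihl hmem' (pvDfs f adj s a) dlen dcf
          refine ⟨c1, fun k hk => c2 k (dmono k hk), ?_, ?_⟩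
          · intro j hj
            rcases List.mem_cons.mp hj with rfl | hj'
            · exact c2 j.toNat d1
            · exact c3 j hj'
          · intro a' ha' hra'
            rcases c4 a' ha' hra' with hda' | hcl
            · rcases d4 a' ha' hda' with hsa' | hclosed
              · exact Or.inl hsa'
              · exact Or.inr (fun b hb => c2 b.toNat (hclosed b hb))
            · exact Or.inr hcl
    have hmemrow : ∀ j ∈ PySem.List.pyGetD adj i [], pvInB sz j := fun j hj => hg i j hj
    have hcfv1 : pvCF (v.set i.toNat true) < f := by omega
    obtain ⟨c1, c2, c3, c4⟩ := aux _ hmemrow (v.set i.toNat true) hlen1 hcfv1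
    constructor
    · simp only [pvDfs]
      exact c2 i.toNat hv1i
    · intro a ha hra
      simp only [pvDfs] at hra ⊢
      rcases c4 a ha hra with hv1a | hcl
      · by_cases hai : a = i.toNat
        · subst hai
          refine Or.inr (fun b hb => ?_)
          refine c3 b ?_
          have hcast : (↑(i.toNat) : Int) = i := Int.toNat_of_nonneg hIn.1
          rwa [pvE, hcast] at hb
        · rw [pvVal_set_other v i.toNat a hai] at hv1a
          exact Or.inl hv1a
      · exact Or.inr hcl

-- ===== BFS (port B's traversal) =====

lemma pvBfs_length (f : Nat) (adj : List (List Int)) : ∀ (seen : List Bool) (q : List Int),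
    (pvBfs f adj seen q).length = seen.length := by
  induction f with
  | zero => intro seen q; rfl
  | succ f ih =>
    intro seen q
    cases q with
    | nil => rfl
    | cons u q =>
      have aux : ∀ (l : List Int) (sq : List Bool × List Int),
          ((l.foldl (fun (sq : List Bool × List Int) v =>
            if PySem.List.pyGetD sq.1 v false then sq
            else (sq.1.set v.toNat true, sq.2 ++ [v])) sq).1).length = sq.1.length := by
        intro l
        induction l with
        | nil => intro sq; rfl
        | cons a l ihl =>
          intro sq
          simp only [List.foldl_cons]
          rw [ihl]
          split
          · rfl
          · simp
      simp only [pvBfs]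
      rw [ih]
      exact aux _ _

lemma pvBfs_sound (adj : List (List Int)) (S : Int) (hpos : ∀ u w, pvE adj u w → 0 ≤ w) :
    ∀ (f : Nat) (seen : List Bool) (q : List Int),
    (∀ u ∈ q, 0 ≤ u ∧ pvReachRel adj S u) →
    (∀ k, pvVal seen k = true → pvReachRel adj S ↑k) →
    ∀ k, pvVal (pvBfs f adj seen q) k = true → pvReachRel adj S ↑k := by
  intro f
  induction f with
  | zero => intro seen q _ hseen k hk; exact hseen k hk
  | succ f ih =>
    intro seen q hq hseen k hk
    cases q with
    | nil => exact hseen k hk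
    | cons u q =>
      have hu : 0 ≤ u ∧ pvReachRel adj S u := hq u List.mem_cons_self
      have aux : ∀ (l : List Int), (∀ j ∈ l, pvE adj u j) → ∀ (sq : List Bool × List Int),
          (∀ x ∈ sq.2, 0 ≤ x ∧ pvReachRel adj S x) →
          (∀ m, pvVal sq.1 m = true → pvReachRel adj S ↑m) →
          (∀ x ∈ (l.foldl (fun (sq : List Bool × List Int) v =>
              if PySem.List.pyGetD sq.1 v false then sq
              else (sq.1.set v.toNat true, sq.2 ++ [v])) sq).2, 0 ≤ x ∧ pvReachRel adj S x) ∧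
          (∀ m, pvVal ((l.foldl (fun (sq : List Bool × List Int) v =>
              if PySem.List.pyGetD sq.1 v false then sq
              else (sq.1.set v.toNat true, sq.2 ++ [v])) sq).1) m = true → pvReachRel adj S ↑m) := by
        intro l
        induction l with
        | nil => intro _ sq h2 h1; exact ⟨h2, h1⟩
        | cons a l ihl =>
          intro hmem sq h2 h1
          have hEa : pvE adj u a := hmem a List.mem_cons_self
          have ha0 : 0 ≤ a := hpos u a hEa
          have hRa : pvReachRel adj S a :=
            Relation.ReflTransGen.tail hu.2 hEa
          simp only [List.foldl_cons]
          split
          · exact ihl (fun j hj => hmem j (List.mem_cons_of_mem a hj)) sq h2 h1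
          · refine ihl (fun j hj => hmem j (List.mem_cons_of_mem a hj)) _ ?_ ?_
            · intro x hx
              rcases List.mem_append.mp hx with hx' | hx'
              · exact h2 x hx'
              · rcases List.mem_singleton.mp hx' with rfl
                exact ⟨ha0, hRa⟩
            · intro m hm
              by_cases hma : m = a.toNat
              · subst hma
                rw [Int.toNat_of_nonneg ha0]
                exact hRa
              · rw [pvVal_set_other sq.1 a.toNat m hma] at hm
                exact h1 m hm
      obtain ⟨h2', h1'⟩ := aux _ (fun j hj => hj) (seen, q)
        (fun x hx => hq x (List.mem_cons_of_mem u hx)) hseen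
      simp only [pvBfs] at hk
      exact ih _ _ h2' h1' k hk

lemma pvBfs_main (adj : List (List Int)) (sz : Nat) (hg : pvGood adj sz) :
    ∀ (f : Nat) (seen : List Bool) (q : List Int), seen.length = sz →
    (∀ u ∈ q, pvInB sz u ∧ pvVal seen u.toNat = true) →
    (∀ a : Nat, a < sz → pvVal seen a = true →
      ((↑a : Int) ∈ q ∨ ∀ b, pvE adj ↑a b → pvVal seen b.toNat = true)) →
    2 * pvCF seen + q.length < f →
    (∀ k, pvVal seen k = true → pvVal (pvBfs f adj seen q) k = true) ∧
    (∀ a : Nat, a < sz → pvVal (pvBfs f adj seen q) a = true →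
      ∀ b, pvE adj ↑a b → pvVal (pvBfs f adj seen q) b.toNat = true) := by
  intro f
  induction f with
  | zero => intro seen q _ _ _ h; omega
  | succ f ih =>
    intro seen q hlen hq hclosed hfuel
    cases q with
    | nil =>
      refine ⟨fun k hk => hk, ?_⟩
      intro a ha hra b hb
      rcases hclosed a ha hra with h | h
      · simp at h
      · exact h b hb
    | cons u q0 =>
      have hu := hq u List.mem_cons_self
      have aux : ∀ (l : List Int), (∀ j ∈ l, pvInB sz j) → ∀ (s : List Bool) (qq : List Int),
          s.length = sz →
          ((l.foldl (fun (sq : List Bool × List Int) v =>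
              if PySem.List.pyGetD sq.1 v false then sq
              else (sq.1.set v.toNat true, sq.2 ++ [v])) (s, qq)).1.length = sz) ∧
          (∀ k, pvVal s k = true → pvVal ((l.foldl (fun (sq : List Bool × List Int) v =>
              if PySem.List.pyGetD sq.1 v false then sq
              else (sq.1.set v.toNat true, sq.2 ++ [v])) (s, qq)).1) k = true) ∧
          (∀ j ∈ l, pvVal ((l.foldl (fun (sq : List Bool × List Int) v =>
              if PySem.List.pyGetD sq.1 v false then sq
              else (sq.1.set v.toNat true, sq.2 ++ [v])) (s, qq)).1) j.toNat = true) ∧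
          (∃ new, (l.foldl (fun (sq : List Bool × List Int) v =>
              if PySem.List.pyGetD sq.1 v false then sq
              else (sq.1.set v.toNat true, sq.2 ++ [v])) (s, qq)).2 = qq ++ new ∧
            (∀ x ∈ new, pvInB sz x ∧ pvVal ((l.foldl (fun (sq : List Bool × List Int) v =>
              if PySem.List.pyGetD sq.1 v false then sq
              else (sq.1.set v.toNat true, sq.2 ++ [v])) (s, qq)).1) x.toNat = true)) ∧
          (∀ a : Nat, a < sz → pvVal ((l.foldl (fun (sq : List Bool × List Int) v =>
              if PySem.List.pyGetD sq.1 v false then sq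
              else (sq.1.set v.toNat true, sq.2 ++ [v])) (s, qq)).1) a = true →
            pvVal s a = true ∨ (↑a : Int) ∈ (l.foldl (fun (sq : List Bool × List Int) v =>
              if PySem.List.pyGetD sq.1 v false then sq
              else (sq.1.set v.toNat true, sq.2 ++ [v])) (s, qq)).2) ∧
          (2 * pvCF ((l.foldl (fun (sq : List Bool × List Int) v =>
              if PySem.List.pyGetD sq.1 v false then sq
              else (sq.1.set v.toNat true, sq.2 ++ [v])) (s, qq)).1)
            + ((l.foldl (fun (sq : List Bool × List Int) v =>
              if PySem.List.pyGetD sq.1 v false then sq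
              else (sq.1.set v.toNat true, sq.2 ++ [v])) (s, qq)).2).length
            ≤ 2 * pvCF s + qq.length) := by
        intro l
        induction l with
        | nil =>
          intro _ s qq hslen
          exact ⟨hslen, fun k hk => hk, by simp, ⟨[], by simp, by simp⟩,
            fun a _ ha => Or.inl ha, le_refl _⟩
        | cons a l ihl =>
          intro hmem s qq hslen
          have hIa : pvInB sz a := hmem a List.mem_cons_self
          have hmem' : ∀ j ∈ l, pvInB sz j := fun j hj => hmem j (List.mem_cons_of_mem a hj)
          simp only [List.foldl_cons]
          by_cases hguard : PySem.List.pyGetD s a false = true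
          · rw [if_pos hguard]
            obtain ⟨c1, c2, c3, ⟨new, hnew, hnewp⟩, c5, c6⟩ := ihl hmem' s qq hslen
            refine ⟨c1, c2, ?_, ⟨new, hnew, hnewp⟩, c5, c6⟩
            intro j hj
            rcases List.mem_cons.mp hj with rfl | hj'
            · refine c2 j.toNat ?_
              rw [← pvVal_int s sz j hslen hIa]
              exact hguard
            · exact c3 j hj'
          · rw [if_neg hguard]
            have haNat : a.toNat < sz := by rcases hIa with ⟨x1, x2⟩; omega
            have hsa : pvVal s a.toNat = false := by
              rw [← pvVal_int s sz a hslen hIa]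
              exact Bool.eq_false_iff.mpr hguard
            have hslen2 : (s.set a.toNat true).length = sz := by simp [hslen]
            have hcf2 : pvCF (s.set a.toNat true) + 1 = pvCF s :=
              pvCF_set s a.toNat (by omega) hsa
            obtain ⟨c1, c2, c3, ⟨new, hnew, hnewp⟩, c5, c6⟩ := ihl hmem' (s.set a.toNat true) (qq ++ [a]) hslen2
            refine ⟨c1, ?_, ?_, ?_, ?_, ?_⟩
            · intro k hk
              exact c2 k (pvVal_set_mono s a.toNat k hk)
            · intro j hj
              rcases List.mem_cons.mp hj with rfl | hj'
              · exact c2 j.toNat (pvVal_set_self s j.toNat (by omega))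
              · exact c3 j hj'
            · refine ⟨a :: new, ?_, ?_⟩
              · rw [hnew]; simp
              · intro x hx
                rcases List.mem_cons.mp hx with rfl | hx'
                · exact ⟨hIa, c2 x.toNat (pvVal_set_self s x.toNat (by omega))⟩
                · exact hnewp x hx'
            · intro a' ha' hra'
              rcases c5 a' ha' hra' with hsa' | hqa'
              · by_cases haa : a' = a.toNat
                · subst haa
                  right
                  rw [hnew, Int.toNat_of_nonneg hIa.1]
                  simp
                · rw [pvVal_set_other s a.toNat a' haa] at hsa'
                  exact Or.inl hsa'
              · exact Or.inr hqa'
            · have : (qq ++ [a]).length = qq.length + 1 := by simp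
              omega
      have hmemrow : ∀ j ∈ PySem.List.pyGetD adj u [], pvInB sz j := fun j hj => hg u j hj
      obtain ⟨c1, c2, c3, ⟨new, hnew, hnewp⟩, c5, c6⟩ := aux _ hmemrow seen q0 hlen
      simp only [pvBfs]
      have hih := ih (List.foldl (fun (sq : List Bool × List Int) v =>
          if PySem.List.pyGetD sq.1 v false then sq
          else (sq.1.set v.toNat true, sq.2 ++ [v])) (seen, q0) (PySem.List.pyGetD adj u [])).1 (List.foldl (fun (sq : List Bool × List Int) v =>
          if PySem.List.pyGetD sq.1 v false then sq
          else (sq.1.set v.toNat true, sq.2 ++ [v])) (seen, q0) (PySem.List.pyGetD adj u [])).2 c1 ?_ ?_ ?_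
      · exact ⟨fun k hk => hih.1 k (c2 k hk), hih.2⟩
      · -- queue invariant for the recursive call
        intro x hx
        rw [hnew] at hx
        rcases List.mem_append.mp hx with hx' | hx'
        · have := hq x (List.mem_cons_of_mem u hx')
          exact ⟨this.1, c2 x.toNat this.2⟩
        · exact hnewp x hx'
      · -- closedness invariant for the recursive call
        intro a ha hra
        rcases c5 a ha hra with hsa | hqa
        · rcases hclosed a ha hsa with hmemq | hcl
          · rcases List.mem_cons.mp hmemq with hau | hq0
            · right
              intro b hb
              refine c3 b ?_
              rw [pvE, hau] at hb
              exact hb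
            · left
              rw [hnew]
              exact List.mem_append.mpr (Or.inl hq0)
          · right
            intro b hb
            exact c2 b.toNat (hcl b hb)
        · left
          exact hqa
      · -- fuel decreases
        simp only [List.length_cons] at hfuel
        omega

-- ===== reachability closes the loop =====

lemma pvReach_inB (adj : List (List Int)) (sz : Nat) (hg : pvGood adj sz) (start : Int)
    (hs : pvInB sz start) : ∀ x, pvReachRel adj start x → pvInB sz x := by
  intro x h
  induction h with
  | refl => exact hs
  | tail h e ih => exact hg _ _ e

lemma pvReach_marked (adj : List (List Int)) (sz : Nat) (hg : pvGood adj sz) (start : Int)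
    (hs : pvInB sz start) (r : List Bool) (hstart : pvVal r start.toNat = true)
    (hclosed : ∀ a : Nat, a < sz → pvVal r a = true → ∀ b, pvE adj ↑a b → pvVal r b.toNat = true) :
    ∀ x, pvReachRel adj start x → pvVal r x.toNat = true := by
  intro x h
  induction h with
  | refl => exact hstart
  | @tail b c h e ih =>
    have hb : pvInB sz b := pvReach_inB adj sz hg start hs b h
    have hbNat : b.toNat < sz := by rcases hb with ⟨x1, x2⟩; omega
    have := hclosed b.toNat hbNat ih c
    rw [Int.toNat_of_nonneg hb.1] at this
    exact this e

-- the two traversals compute the same visited array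
lemma pvSearch_eq (adj : List (List Int)) (sz : Nat) (hg : pvGood adj sz) (start : Int)
    (hs : pvInB sz start) :
    pvDfs (sz + 1) adj (List.replicate sz false) start
      = pvBfs (2*sz + 2) adj ((List.replicate sz false).set start.toNat true) [start] := by
  have hpos : ∀ u w, pvE adj u w → 0 ≤ w := fun u w e => (hg u w e).1
  have hsNat : start.toNat < sz := by rcases hs with ⟨x1, x2⟩; omega
  have hcast : (↑start.toNat : Int) = start := Int.toNat_of_nonneg hs.1
  -- DFS facts
  have hrep : (List.replicate sz false).length = sz := by simp
  have hd := pvDfs_complete adj sz hg (sz+1) (List.replicate sz false) start hrep hs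
    (pvVal_replicate sz start.toNat) (by rw [pvCF_replicate]; omega)
  have hdclosed : ∀ a : Nat, a < sz →
      pvVal (pvDfs (sz+1) adj (List.replicate sz false) start) a = true →
      ∀ b, pvE adj ↑a b →
        pvVal (pvDfs (sz+1) adj (List.replicate sz false) start) b.toNat = true := by
    intro a ha hra b hb
    rcases hd.2 a ha hra with h | h
    · rw [pvVal_replicate] at h; cases h
    · exact h b hb
  have hdchar : ∀ k : Nat, k < sz →
      (pvVal (pvDfs (sz+1) adj (List.replicate sz false) start) k = true ↔
        pvReachRel adj start ↑k) := by
    intro k hk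
    constructor
    · intro h
      rcases pvDfs_sound adj hpos (sz+1) (List.replicate sz false) start hs.1 k h with h' | h'
      · rw [pvVal_replicate] at h'; cases h'
      · exact h'
    · intro h
      have := pvReach_marked adj sz hg start hs _ hd.1 hdclosed ↑k h
      rwa [Int.toNat_natCast] at this
  -- BFS facts
  have hseen0 : ∀ k : Nat, pvVal ((List.replicate sz false).set start.toNat true) k = true →
      k = start.toNat := by
    intro k hk
    by_contra hne
    rw [pvVal_set_other _ _ _ hne, pvVal_replicate] at hk
    cases hk
  have hstart0 : pvVal ((List.replicate sz false).set start.toNat true) start.toNat = true :=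
    pvVal_set_self _ _ (by simpa using hsNat)
  have hb := pvBfs_main adj sz hg (2*sz+2) ((List.replicate sz false).set start.toNat true)
    [start] (by simp)
    (by intro u hu; rcases List.mem_singleton.mp hu with rfl; exact ⟨hs, hstart0⟩)
    (by intro a ha hva; left; rw [hseen0 a hva, hcast]; exact List.mem_singleton_self start)
    (by have := pvCF_set (List.replicate sz false) start.toNat (by simpa using hsNat)
          (pvVal_replicate sz start.toNat)
        rw [pvCF_replicate] at this
        simp only [List.length_cons, List.length_nil]
        omega)
  have hbchar : ∀ k : Nat, k < sz →
      (pvVal (pvBfs (2*sz+2) adj ((List.replicate sz false).set start.toNat true) [start]) k = true ↔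
        pvReachRel adj start ↑k) := by
    intro k hk
    constructor
    · intro h
      refine pvBfs_sound adj start hpos (2*sz+2) _ [start] ?_ ?_ k h
      · intro u hu; rcases List.mem_singleton.mp hu with rfl
        exact ⟨hs.1, Relation.ReflTransGen.refl⟩
      · intro m hm
        rw [hseen0 m hm, hcast]
        exact Relation.ReflTransGen.refl
    · intro h
      have := pvReach_marked adj sz hg start hs _ (hb.1 start.toNat hstart0) hb.2 ↑k h
      rwa [Int.toNat_natCast] at this
  -- pointwise equality
  apply List.ext_getElem
  · rw [pvDfs_length, pvBfs_length]; simp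
  · intro k h1 h2
    have hk : k < sz := by rwa [pvDfs_length, hrep] at h1
    have hv1 : (pvDfs (sz+1) adj (List.replicate sz false) start)[k] =
        pvVal (pvDfs (sz+1) adj (List.replicate sz false) start) k := by
      rw [pvVal, List.getD_eq_getElem?_getD, List.getElem?_eq_getElem h1]; rfl
    have hv2 : (pvBfs (2*sz+2) adj ((List.replicate sz false).set start.toNat true) [start])[k] =
        pvVal (pvBfs (2*sz+2) adj ((List.replicate sz false).set start.toNat true) [start]) k := by
      rw [pvVal, List.getD_eq_getElem?_getD, List.getElem?_eq_getElem h2]; rfl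
    rw [hv1, hv2]
    by_cases hR : pvReachRel adj start ↑k
    · rw [(hdchar k hk).mpr hR, (hbchar k hk).mpr hR]
    · have e1 := (hdchar k hk); have e2 := (hbchar k hk)
      rw [Bool.eq_false_iff.mpr (fun hc => hR (e1.mp hc)),
          Bool.eq_false_iff.mpr (fun hc => hR (e2.mp hc))]

-- ===== the two graph constructions agree =====

lemma pvInnerA (n : Int) (ds : List Int) (i : Int) : ∀ (l : List Int) (g rg : List (List Int)),
    l.foldl (fun s j =>
        let t := max 0 (min (n+1) (j + PySem.List.pyGetD ds j 0))
        (s.1.modify i.toNat (· ++ [t]), s.2.modify t.toNat (· ++ [i]))) (g, rg)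
      = (g.modify i.toNat (· ++ l.map (pvTgt n ds)),
         (l.map (pvTgt n ds)).foldl (fun p v => p.modify v.toNat (· ++ [i])) rg) := by
  intro l
  induction l with
  | nil =>
    intro g rg
    simp only [List.map_nil, List.foldl_nil, List.append_nil]
    rw [show (fun r : List Int => r) = id from rfl, List.modify_id]
  | cons a l ihl =>
    intro g rg
    simp only [List.foldl_cons, List.map_cons]
    show List.foldl _ (g.modify i.toNat (· ++ [pvTgt n ds a]),
        rg.modify (pvTgt n ds a).toNat (· ++ [i])) l = _
    rw [ihl]
    refine congrArg₂ Prod.mk ?_ rfl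
    rw [List.modify_modify_eq]
    exact congrArg (g.modify i.toNat) (funext fun r => by simp)

lemma pvBuildA (mr n : Int) (ds : List Int) (_hn : -1 ≤ n) : ∀ (m : Nat), (m : Int) ≤ n + 2 →
    (PySem.List.pyRange 0 (m : Int)).foldl
      (fun (s : List (List Int) × List (List Int)) i =>
        (PySem.List.pyRange (min (n+1) (i+1)) (min (n+1) (i+mr) + 1)).foldl
          (fun s j =>
            let t := max 0 (min (n+1) (j + PySem.List.pyGetD ds j 0))
            (s.1.modify i.toNat (· ++ [t]), s.2.modify t.toNat (· ++ [i])))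
          s)
      (List.replicate (n+2).toNat [], List.replicate (n+2).toNat [])
    = ((PySem.List.pyRange 0 (n+2)).map (fun i => if i < (m : Int) then pvRow mr n ds i else []),
       (PySem.List.pyRange 0 (m : Int)).foldl
         (fun p u => (pvRow mr n ds u).foldl (fun p v => p.modify v.toNat (· ++ [u])) p)
         (List.replicate (n+2).toNat [])) := by
  intro m
  induction m with
  | zero =>
    intro _
    rw [show ((0:Nat):Int) = 0 from rfl, PySem.List.pyRange_one_eq_nil (le_refl 0)]
    simp only [List.foldl_nil]
    refine congrArg₂ Prod.mk ?_ rfl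
    rw [List.map_congr_left (g := fun _ => ([] : List Int)) ?_]
    · rw [List.map_const', PySem.List.length_pyRange_one]
      norm_num
    · intro i hi
      have h0 : 0 ≤ i := (PySem.List.mem_pyRange_one.mp hi).1
      rw [if_neg (by omega)]
  | succ m ihm =>
    intro hm
    have h0m : (0:Int) ≤ (m:Int) := by positivity
    have hm' : ((m:Nat):Int) ≤ n + 2 := by push_cast at hm ⊢; omega
    rw [show ((m+1:Nat):Int) = (m:Int)+1 by push_cast; ring]
    rw [PySem.List.pyRange_one_succ_right h0m]
    rw [List.foldl_append, List.foldl_append, ihm hm']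
    simp only [List.foldl_cons, List.foldl_nil]
    rw [pvInnerA n ds]
    refine congrArg₂ Prod.mk ?_ rfl
    have hcast : ((m:Int)).toNat = m := Int.toNat_natCast m
    rw [hcast]
    apply List.ext_getElem
    · simp
    · intro t h1 h2
      simp only [List.getElem_modify, List.getElem_map, PySem.List.getElem_pyRange_one]
      by_cases hmt : m = t
      · subst hmt
        rw [if_pos rfl, if_neg (by omega), if_pos (by omega)]
        simp only [List.nil_append, zero_add]
        rfl
      · rw [if_neg hmt]
        have : ((0:Int) + ↑t < ↑m) ↔ ((0:Int) + ↑t < ↑m + 1) := by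
          omega
        by_cases hlt : (0:Int) + ↑t < ↑m
        · rw [if_pos hlt, if_pos (this.mp hlt)]
        · rw [if_neg hlt, if_neg (fun hc => hlt (by omega))]

lemma pvBuildA' (mr n : Int) (ds : List Int) (hn : -1 ≤ n) :
    (PySem.List.pyRange 0 (n+2)).foldl
      (fun (s : List (List Int) × List (List Int)) i =>
        (PySem.List.pyRange (min (n+1) (i+1)) (min (n+1) (i+mr) + 1)).foldl
          (fun s j =>
            let t := max 0 (min (n+1) (j + PySem.List.pyGetD ds j 0))
            (s.1.modify i.toNat (· ++ [t]), s.2.modify t.toNat (· ++ [i])))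
          s)
      (List.replicate (n+2).toNat [], List.replicate (n+2).toNat [])
    = ((PySem.List.pyRange 0 (n+2)).map (pvRow mr n ds),
       (PySem.List.pyRange 0 (n+2)).foldl
         (fun p u => (pvRow mr n ds u).foldl (fun p v => p.modify v.toNat (· ++ [u])) p)
         (List.replicate (n+2).toNat [])) := by
  have hcast : (((n+2).toNat : Nat) : Int) = n+2 := Int.toNat_of_nonneg (by omega)
  have := pvBuildA mr n ds hn (n+2).toNat (by rw [hcast])
  rw [hcast] at this
  rw [this]
  refine congrArg₂ Prod.mk ?_ rfl
  apply List.map_congr_left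
  intro i hi
  rw [if_pos (PySem.List.mem_pyRange_one.mp hi).2]

lemma pvSucc_eq (mr n : Int) (instr : List Int) (_hn : -1 ≤ n)
    (hpre : n ≤ (instr.length : Int) ∨ mr ≤ -1) :
    ((PySem.List.pyRange 0 (n+2)).map (fun i =>
      (PySem.List.pyRange (min (n+1) (i+1)) (min (n+1) (i+mr) + 1)).map
        (fun j => PySem.List.pyGetD
          ((PySem.List.enumerate ([0] ++ instr ++ [0]) 0).map
            (fun p => max 0 (min (n+1) (p.1 + p.2)))) j 0)))
    = (PySem.List.pyRange 0 (n+2)).map (pvRow mr n ([0] ++ instr ++ [0])) := by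
  apply List.map_congr_left
  intro i hi
  obtain ⟨hi0, hiN⟩ := PySem.List.mem_pyRange_one.mp hi
  rw [pvRow]
  apply List.map_congr_left
  intro j hj
  obtain ⟨hj1, hj2⟩ := PySem.List.mem_pyRange_one.mp hj
  have hds : ([0] ++ instr ++ [0]).length = instr.length + 2 := by simp
  have hj0 : 0 ≤ j := by omega
  have hjlen : j < ((([0] ++ instr ++ [0]).length : Nat) : Int) := by
    rw [hds]
    push_cast
    rcases hpre with h | h
    · omega
    · omega
  have hflen : ((PySem.List.enumerate ([0] ++ instr ++ [0]) 0).map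
      (fun p : Int × Int => max 0 (min (n+1) (p.1 + p.2)))).length
      = ([0] ++ instr ++ [0]).length := by
    rw [List.length_map, PySem.List.length_enumerate]
  rw [PySem.List.pyGetD_eq_getElem _ _ hj0 (by rw [hflen]; exact hjlen)]
  rw [List.getElem_map, PySem.List.getElem_enumerate]
  rw [pvTgt, PySem.List.pyGetD_eq_getElem _ _ hj0 hjlen]
  rw [zero_add, Int.toNat_of_nonneg hj0]

lemma pvRow_good (mr n : Int) (ds : List Int) (hn : -1 ≤ n) :
    pvGood ((PySem.List.pyRange 0 (n+2)).map (pvRow mr n ds)) (n+2).toNat := by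
  intro u v hE
  have hcast : (((n+2).toNat : Nat) : Int) = n+2 := Int.toNat_of_nonneg (by omega)
  rcases pvGetD_cases ((PySem.List.pyRange 0 (n+2)).map (pvRow mr n ds)) u [] with h | h
  · rw [pvE, h] at hE; cases hE
  · obtain ⟨i, _, heq⟩ := List.mem_map.mp h
    rw [pvE, ← heq] at hE
    obtain ⟨j, _, hveq⟩ := List.mem_map.mp hE
    rw [pvInB, hcast, ← hveq, pvTgt]
    omega

lemma pvMem_modify {α : Type} (p : List α) : ∀ (k : Nat) (f : α → α) (r : α),
    r ∈ p.modify k f → r ∈ p ∨ ∃ r' ∈ p, r = f r' := by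
  induction p with
  | nil => intro k f r h; rw [List.modify_nil] at h; cases h
  | cons x p ih =>
    intro k f r h
    cases k with
    | zero =>
      rw [List.modify_zero_cons] at h
      rcases List.mem_cons.mp h with rfl | h'
      · exact Or.inr ⟨x, List.mem_cons_self, rfl⟩
      · exact Or.inl (List.mem_cons_of_mem x h')
    | succ k =>
      rw [List.modify_succ_cons] at h
      rcases List.mem_cons.mp h with rfl | h'
      · exact Or.inl List.mem_cons_self
      · rcases ih k f r h' with h'' | ⟨r', hr', rfl⟩
        · exact Or.inl (List.mem_cons_of_mem x h'')
        · exact Or.inr ⟨r', List.mem_cons_of_mem x hr', rfl⟩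

lemma pvPred_good (mr n : Int) (ds : List Int) (hn : -1 ≤ n) :
    pvGood ((PySem.List.pyRange 0 (n+2)).foldl
      (fun p u => (pvRow mr n ds u).foldl (fun p v => p.modify v.toNat (· ++ [u])) p)
      (List.replicate (n+2).toNat [])) (n+2).toNat := by
  have hcast : (((n+2).toNat : Nat) : Int) = n+2 := Int.toNat_of_nonneg (by omega)
  have inner : ∀ (row : List Int) (u : Int) (p : List (List Int)), pvInB (n+2).toNat u →
      (∀ r ∈ p, ∀ x ∈ r, pvInB (n+2).toNat x) →
      ∀ r ∈ row.foldl (fun p v => p.modify v.toNat (· ++ [u])) p, ∀ x ∈ r, pvInB (n+2).toNat x := by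
    intro row
    induction row with
    | nil => intro u p _ hp; exact hp
    | cons v row ihr =>
      intro u p hu hp
      simp only [List.foldl_cons]
      refine ihr u _ hu ?_
      intro r hr x hx
      rcases pvMem_modify p v.toNat _ r hr with h | ⟨r', hr', rfl⟩
      · exact hp r h x hx
      · rcases List.mem_append.mp hx with h' | h'
        · exact hp r' hr' x h'
        · rcases List.mem_singleton.mp h' with rfl
          exact hu
  have outer : ∀ (L : List Int) (p : List (List Int)), (∀ u ∈ L, pvInB (n+2).toNat u) →
      (∀ r ∈ p, ∀ x ∈ r, pvInB (n+2).toNat x) →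
      ∀ r ∈ L.foldl (fun p u => (pvRow mr n ds u).foldl
        (fun p v => p.modify v.toNat (· ++ [u])) p) p, ∀ x ∈ r, pvInB (n+2).toNat x := by
    intro L
    induction L with
    | nil => intro p _ hp; exact hp
    | cons u L ihL =>
      intro p hL hp
      simp only [List.foldl_cons]
      exact ihL _ (fun w hw => hL w (List.mem_cons_of_mem u hw))
        (inner _ u p (hL u List.mem_cons_self) hp)
  intro u v hE
  rcases pvGetD_cases ((PySem.List.pyRange 0 (n+2)).foldl
      (fun p u => (pvRow mr n ds u).foldl (fun p v => p.modify v.toNat (· ++ [u])) p)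
      (List.replicate (n+2).toNat [])) u [] with h | h
  · rw [pvE, h] at hE; cases hE
  · refine outer _ _ ?_ ?_ _ h v hE
    · intro w hw
      obtain ⟨h0, h1⟩ := PySem.List.mem_pyRange_one.mp hw
      exact ⟨h0, by rw [hcast]; exact h1⟩
    · intro r hr x hx
      rw [List.eq_of_mem_replicate hr] at hx
      cases hx

-- final if/any/all reconciliation
lemma pvAnswer_eq (l : List (Bool × Bool)) :
    (if l.any (fun p => p.1 && !p.2) then "NG" else "OK")
      = (if l.all (fun p => p.2 || !p.1) then "OK" else "NG") := by
  rw [List.any_eq_not_all_not]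
  rw [show (fun a : Bool × Bool => !(a.1 && !a.2)) = (fun p : Bool × Bool => p.2 || !p.1) from
    funext fun p => by rcases p with ⟨x, y⟩; cases x <;> cases y <;> rfl]
  cases l.all (fun p : Bool × Bool => p.2 || !p.1) <;> rfl

-- ===== VERDICT (by name: the statement is the Claim_ definition above) =====
theorem can_reach_goal_spec : Claim_equal_can_reach_goal := by
  intro mr n instr _hdom hpre
  obtain ⟨hn, hrest⟩ := hpre
  unfold Spec_can_reach_goal
  have hcast : (((n+2).toNat : Nat) : Int) = n+2 := Int.toNat_of_nonneg (by omega)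
  show can_reach_goal mr n instr = can_reach_goal_alt mr n instr
  simp only [can_reach_goal, can_reach_goal_alt, pvReachList]
  rw [pvBuildA' mr n ([0] ++ instr ++ [0]) hn]
  rw [pvSucc_eq mr n instr hn hrest]
  have hpredeq :
      (PySem.List.pyRange 0 (n+2)).foldl
        (fun p u => (PySem.List.pyGetD
            ((PySem.List.pyRange 0 (n+2)).map (pvRow mr n ([0] ++ instr ++ [0]))) u []).foldl
          (fun p v => p.modify v.toNat (· ++ [u])) p)
        (List.replicate (n+2).toNat [])
      = (PySem.List.pyRange 0 (n+2)).foldl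
        (fun p u => (pvRow mr n ([0] ++ instr ++ [0]) u).foldl
          (fun p v => p.modify v.toNat (· ++ [u])) p)
        (List.replicate (n+2).toNat []) := by
    refine PySem.List.foldl_congr_mem _ _ _ _ ?_
    intro acc u hu
    obtain ⟨h0, h1⟩ := PySem.List.mem_pyRange_one.mp hu
    rw [PySem.List.pyGetD_map_pyRange_of_nonneg _ _ _ _ h0 h1]
  rw [hpredeq]
  have hs0 : pvInB (n+2).toNat 0 := ⟨le_refl 0, by rw [hcast]; omega⟩
  have hsN : pvInB (n+2).toNat (n+1) := ⟨by omega, by rw [hcast]; omega⟩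
  rw [pvSearch_eq _ (n+2).toNat (pvRow_good mr n ([0] ++ instr ++ [0]) hn) 0 hs0]
  rw [pvSearch_eq _ (n+2).toNat (pvPred_good mr n ([0] ++ instr ++ [0]) hn) (n+1) hsN]
  exact pvAnswer_eq _
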